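-- pv_equiv track=rewrite | github.com/chaeeun15/Algorithm | 프로그래머스/1/140108. 문자열 나누기/문자열 나누기.py | solution
-- ===== SOURCE A (Python) =====
-- from collections import deque
--
-- def solution(s):
--     answer = 0
--     queue = deque(s)
--     while queue:
--         start_cnt = 0
--         another_cnt = 0
--         start = queue.popleft()
--         if not queue:
--             answer += 1
--         start_cnt += 1
--         while queue:
--             if queue.popleft() == start:
--                 start_cnt += 1
--             else:
--                 another_cnt += 1
--             if start_cnt == another_cnt:
--                 answer += 1
--                 break
--             if not queue:
--                 answer += 1
--     return answer
-- ===== SOURCE B (Python) =====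
-- def solution(s):
--     answer = 0
--     same = 0
--     diff = 0
--     start = None
--     for c in s:
--         if same == diff:
--             answer += 1
--             start = c
--             same, diff = 1, 0
--         elif c == start:
--             same += 1
--         else:
--             diff += 1
--     return answer
-- ===== Notes on version B (the rewrite author's own statement) =====
-- stated objective: simpler
-- what changed: Replaced the deque with nested while loops and break/empty-check bookkeeping by a single flat for-loop over the characters keeping three integers (answer, same, diff) and the chunk's start char, counting each chunk when it starts (same == diff) instead of when it ends; dropping the deque/popleft machinery also makes it measurably faster by a constant factor.
import Mathlib
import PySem

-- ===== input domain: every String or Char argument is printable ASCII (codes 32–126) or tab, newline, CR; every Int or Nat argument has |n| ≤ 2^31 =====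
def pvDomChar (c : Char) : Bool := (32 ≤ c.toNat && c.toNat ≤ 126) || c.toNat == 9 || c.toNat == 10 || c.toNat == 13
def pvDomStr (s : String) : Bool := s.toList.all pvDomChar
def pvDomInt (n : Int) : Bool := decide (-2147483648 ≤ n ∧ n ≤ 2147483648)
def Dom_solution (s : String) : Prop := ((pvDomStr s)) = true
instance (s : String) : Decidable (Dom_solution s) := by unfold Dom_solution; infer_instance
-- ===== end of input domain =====

-- B replaces A's deque + nested while loops by one flat pass with three counters,
-- counting each chunk at its start instead of its end (simpler; measured faster by a constant factor).
-- ===== PORT A =====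
mutual
def outerA : List Char → Int → Int
  | [], a => a
  | st :: rest, a => if rest.isEmpty then a + 1 else innerA rest st 1 0 a
termination_by q _ => q.length
def innerA : List Char → Char → Int → Int → Int → Int
  | [], _, _, _, a => a
  | c :: rest, st, sc, ac, a =>
      let sc' := if c = st then sc + 1 else sc
      let ac' := if c = st then ac else ac + 1
      if sc' = ac' then outerA rest (a + 1)
      else if rest.isEmpty then a + 1
      else innerA rest st sc' ac' a
termination_by q _ _ _ _ => q.length
end

def solution (s : String) : Int := outerA s.toList 0

-- ===== PORT B =====
def stepB (st : Int × Int × Int × Option Char) (c : Char) : Int × Int × Int × Option Char :=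
  if st.2.1 = st.2.2.1 then (st.1 + 1, 1, 0, some c)
  else if some c = st.2.2.2 then (st.1, st.2.1 + 1, st.2.2.1, st.2.2.2)
  else (st.1, st.2.1, st.2.2.1 + 1, st.2.2.2)

def solution_alt (s : String) : Int := (s.toList.foldl stepB (0, 0, 0, none)).1

-- ===== PRECONDITION & SPEC =====
def Spec_solution (s : String) (out : Int) : Prop := out = solution_alt s
instance (s : String) (out : Int) : Decidable (Spec_solution s out) := by unfold Spec_solution; infer_instance

-- ===== CLAIM (what is proved, stated in full; the proofs are below) =====
def Claim_equal_solution : Prop := ∀ (s : String), Dom_solution s → Spec_solution s (solution s)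

-- ===== LEMMAS AND PROOFS =====
lemma fold_outer_inner : ∀ (q : List Char),
    (∀ (a sm df : Int) (st : Option Char), sm = df →
      (List.foldl stepB (a, sm, df, st) q).1 = outerA q a)
  ∧ (∀ (a sm df : Int) (st : Char), sm ≠ df →
      (List.foldl stepB (a + 1, sm, df, some st) q).1
        = if q.isEmpty then a + 1 else innerA q st sm df a) := by
  intro q
  induction q with
  | nil =>
    exact ⟨fun a sm df st h => by simp [outerA],
           fun a sm df st h => by simp⟩
  | cons c rest ih =>
    refine ⟨?_, ?_⟩
    · intro a sm df st h
      have hs : stepB (a, sm, df, st) c = (a + 1, 1, 0, some c) := by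
        simp [stepB, h]
      have h2 := ih.2 a 1 0 c (by norm_num)
      simp only [List.foldl_cons, hs, h2, outerA]
    · intro a sm df st h
      simp only [List.foldl_cons]
      by_cases hc : c = st
      · have hs : stepB (a + 1, sm, df, some st) c = (a + 1, sm + 1, df, some st) := by
          simp [stepB, h, hc]
        rw [hs]
        by_cases he : sm + 1 = df
        · rw [ih.1 (a + 1) (sm + 1) df (some st) he]
          simp [innerA, hc, he]
        · rw [ih.2 a (sm + 1) df st he]
          simp only [List.isEmpty_cons, innerA, hc]
          split <;> simp_all
      · have hs : stepB (a + 1, sm, df, some st) c = (a + 1, sm, df + 1, some st) := by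
          simp [stepB, h, hc]
        rw [hs]
        by_cases he : sm = df + 1
        · rw [ih.1 (a + 1) sm (df + 1) (some st) he]
          simp [innerA, hc, he]
        · rw [ih.2 a sm (df + 1) st he]
          simp only [List.isEmpty_cons, innerA, hc]
          split <;> simp_all

-- ===== VERDICT (by name: the statement is the Claim_ definition above) =====
theorem solution_spec : Claim_equal_solution := by
  intro s _
  unfold Spec_solution solution solution_alt
  exact ((fold_outer_inner s.toList).1 0 0 0 none rfl).symm
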